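-- pv_equiv track=rewrite | github.com/MatsudaYoshio/study | ProgrammingForThePuzzled/chapter9/talent.py | RemoveUpwardCompatible
-- ===== SOURCE A (Python) =====
-- def RemoveUpwardCompatible(candList, candTalents):
--     Candidates = []
--     CandidateTalents = []
--     RemoveSet = set()
--     for i in range(len(candTalents)):
--         for j in range(i+1, len(candTalents)):
--             if set(candTalents[i]) <= set(candTalents[j]):
--                 RemoveSet.add(i)
--             elif set(candTalents[j]) <= set(candTalents[i]):
--                 RemoveSet.add(j)
--
--     for i in range(len(candList)):
--         if i not in RemoveSet:
--             Candidates.append(candList[i])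
--             CandidateTalents.append(candTalents[i])
--
--     return Candidates, CandidateTalents
-- ===== SOURCE B (Python) =====
-- def RemoveUpwardCompatible(candList, candTalents):
--     n = len(candTalents)
--     # inverted index: talent -> set of indices owning it
--     owners = {}
--     for i in range(n):
--         for t in candTalents[i]:
--             owners.setdefault(t, set()).add(i)
--     sizes = [len(set(t)) for t in candTalents]
--     Candidates = []
--     CandidateTalents = []
--     for k in range(len(candList)):
--         # dominators of k = indices owning every talent of k (posting-list intersection)
--         dom = set(range(n))
--         for t in candTalents[k]:
--             dom &= owners[t]
--         if not any(m != k and (sizes[m] != sizes[k] or m > k) for m in dom):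
--             Candidates.append(candList[k])
--             CandidateTalents.append(candTalents[k])
--     return Candidates, CandidateTalents
-- ===== Notes on version B (the rewrite author's own statement) =====
-- stated objective: alternative
-- what changed: Replaces A's all-pairs subset scan into a RemoveSet by an inverted index (talent -> set of owner indices): candidate k's dominators are the intersection of the owner sets of k's talents, so no pairwise set-subset comparison is ever performed; equal-set ties are broken by comparing deduplicated talent counts (subset plus equal size means equal set), keeping exactly A's later-index rule.
import Mathlib
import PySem

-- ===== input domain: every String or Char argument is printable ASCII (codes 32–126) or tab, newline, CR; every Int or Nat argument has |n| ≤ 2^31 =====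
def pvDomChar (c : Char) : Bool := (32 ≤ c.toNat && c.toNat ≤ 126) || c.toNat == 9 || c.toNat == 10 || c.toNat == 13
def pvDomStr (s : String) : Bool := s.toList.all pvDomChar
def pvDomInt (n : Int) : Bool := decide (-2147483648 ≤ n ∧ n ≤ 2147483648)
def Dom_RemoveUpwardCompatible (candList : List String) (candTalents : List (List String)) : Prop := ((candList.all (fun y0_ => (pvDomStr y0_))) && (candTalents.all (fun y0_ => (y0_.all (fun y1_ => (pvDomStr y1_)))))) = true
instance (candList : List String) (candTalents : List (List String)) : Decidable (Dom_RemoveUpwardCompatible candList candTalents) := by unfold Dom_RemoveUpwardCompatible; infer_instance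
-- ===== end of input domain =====

-- B replaces A's all-pairs subset scan by an inverted index (talent -> owner-index set) with
-- posting-list intersection; ties on equal sets are broken via deduplicated sizes (alternative).

-- ===== PORT A =====
-- set(candTalents[i]) <= set(candTalents[j])
def subA (cT : List (List String)) (i j : Nat) : Bool :=
  PySem.Set.issubset (PySem.Set.ofList (cT.getD i [])) (PySem.Set.ofList (cT.getD j []))

-- body of A's inner j-loop (adds to RemoveSet)
def innerStep (cT : List (List String)) (i : Nat) (rs : PySem.Set Nat) (j : Nat) : PySem.Set Nat :=
  if subA cT i j then PySem.Set.add rs i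
  else if subA cT j i then PySem.Set.add rs j
  else rs

-- A's first double loop building RemoveSet
def removeSetA (cT : List (List String)) : PySem.Set Nat :=
  (List.range cT.length).foldl
    (fun rs i => (List.range' (i+1) (cT.length - (i+1))).foldl (innerStep cT i) rs)
    PySem.Set.empty

def RemoveUpwardCompatible (candList : List String) (candTalents : List (List String)) : List String × List (List String) :=
  let rs := removeSetA candTalents
  (List.range candList.length).foldl
    (fun acc i =>
      if PySem.Set.contains rs i then acc
      else (acc.1 ++ [candList.getD i ""], acc.2 ++ [candTalents.getD i []]))
    ([], [])

-- ===== PORT B =====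
-- owners: inverted index talent -> set of indices owning it (setdefault(t,set()).add(i) ported as modify)
def ownersB (cT : List (List String)) : PySem.Dict String (PySem.Set Nat) :=
  (List.range cT.length).foldl
    (fun d i => (cT.getD i []).foldl
      (fun d t => d.modify t PySem.Set.empty (fun s => PySem.Set.add s i)) d)
    PySem.Dict.empty

-- dom = set(range(n)); for t in candTalents[k]: dom &= owners[t]
-- (owners[t] ported as getD: under Pre_ every talent of row k is a key of owners)
def domB (owners : PySem.Dict String (PySem.Set Nat)) (n : Nat) (tk : List String) : PySem.Set Nat :=
  tk.foldl (fun dom t => PySem.Set.inter dom (owners.getD t PySem.Set.empty))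
    (PySem.Set.ofList (List.range n))

-- the any(...) test over the dominator set
def dominatedB (owners : PySem.Dict String (PySem.Set Nat)) (sizes : List Nat) (n k : Nat)
    (tk : List String) : Bool :=
  (domB owners n tk).any (fun m =>
    decide (m ≠ k) && (decide (sizes.getD m 0 ≠ sizes.getD k 0) || decide (m > k)))

def RemoveUpwardCompatible_alt (candList : List String) (candTalents : List (List String)) : List String × List (List String) :=
  let n := candTalents.length
  let owners := ownersB candTalents
  let sizes := candTalents.map (fun t => (PySem.Set.ofList t).length)
  (List.range candList.length).foldl
    (fun acc k =>
      if dominatedB owners sizes n k (candTalents.getD k []) then acc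
      else (acc.1 ++ [candList.getD k ""], acc.2 ++ [candTalents.getD k []]))
    ([], [])

-- ===== PRECONDITION & SPEC =====
-- Pre_ excludes exactly the inputs where A raises IndexError: when candList is longer than
-- candTalents the second loop reads candTalents[i] at an out-of-range index (never removed).
def Pre_RemoveUpwardCompatible (candList : List String) (candTalents : List (List String)) : Prop :=
  candList.length ≤ candTalents.length
instance (candList : List String) (candTalents : List (List String)) : Decidable (Pre_RemoveUpwardCompatible candList candTalents) := by unfold Pre_RemoveUpwardCompatible; infer_instance

def pvWitness_RemoveUpwardCompatible : List String × List (List String) :=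
  (["alice", "bob"], [["sing"], ["sing", "dance"]])

def Spec_RemoveUpwardCompatible (candList : List String) (candTalents : List (List String)) (out : List String × List (List String)) : Prop := out = RemoveUpwardCompatible_alt candList candTalents
instance (candList : List String) (candTalents : List (List String)) (out : List String × List (List String)) : Decidable (Spec_RemoveUpwardCompatible candList candTalents out) := by unfold Spec_RemoveUpwardCompatible; infer_instance

-- ===== CLAIM (what is proved, stated in full; the proofs are below) =====
def Claim_equal_RemoveUpwardCompatible : Prop := ∀ (candList : List String) (candTalents : List (List String)), Dom_RemoveUpwardCompatible candList candTalents → Pre_RemoveUpwardCompatible candList candTalents → Spec_RemoveUpwardCompatible candList candTalents (RemoveUpwardCompatible candList candTalents)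

-- ===== LEMMAS AND PROOFS =====

-- the condition under which A's inner loop body puts k into the set, for a pair (i, j)
def addedProp (cT : List (List String)) (i j k : Nat) : Prop :=
  (subA cT i j = true ∧ k = i) ∨ (¬ subA cT i j = true ∧ subA cT j i = true ∧ k = j)

theorem mem_innerStep_foldl (cT : List (List String)) (i : Nat) :
    ∀ (L : List Nat) (rs : PySem.Set Nat) (k : Nat),
      k ∈ L.foldl (innerStep cT i) rs ↔ k ∈ rs ∨ ∃ j ∈ L, addedProp cT i j k := by
  intro L
  induction L with
  | nil => intro rs k; simp
  | cons j L ih =>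
    intro rs k
    rw [List.foldl_cons, ih]
    have hstep : k ∈ innerStep cT i rs j ↔ k ∈ rs ∨ addedProp cT i j k := by
      unfold innerStep addedProp
      split_ifs with h1 h2
      · simp only [PySem.Set.mem_add]; tauto
      · simp only [PySem.Set.mem_add]; tauto
      · tauto
    rw [hstep, List.exists_mem_cons_iff, or_assoc]

theorem mem_removeSetA (cT : List (List String)) (k : Nat) :
    k ∈ removeSetA cT ↔
      ∃ i ∈ List.range cT.length, ∃ j ∈ List.range' (i+1) (cT.length - (i+1)), addedProp cT i j k := by
  unfold removeSetA
  have main : ∀ (L : List Nat) (rs : PySem.Set Nat),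
      k ∈ L.foldl (fun rs i => (List.range' (i+1) (cT.length - (i+1))).foldl (innerStep cT i) rs) rs ↔
      k ∈ rs ∨ ∃ i ∈ L, ∃ j ∈ List.range' (i+1) (cT.length - (i+1)), addedProp cT i j k := by
    intro L
    induction L with
    | nil => intro rs; simp
    | cons i L ih =>
      intro rs
      rw [List.foldl_cons, ih, mem_innerStep_foldl, List.exists_mem_cons_iff, or_assoc]
  rw [main]
  simp [PySem.Set.empty]

-- membership in the inner fold of ownersB (one row i over its talent list)
theorem mem_ownersB_inner (i : Nat) :
    ∀ (ts : List String) (d : PySem.Dict String (PySem.Set Nat)) (t : String) (m : Nat),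
      m ∈ (ts.foldl (fun d t => d.modify t PySem.Set.empty (fun s => PySem.Set.add s i)) d).getD t PySem.Set.empty
        ↔ m ∈ d.getD t PySem.Set.empty ∨ (t ∈ ts ∧ m = i) := by
  intro ts
  induction ts with
  | nil => intro d t m; simp
  | cons t0 ts ih =>
    intro d t m
    rw [List.foldl_cons, ih]
    rw [PySem.Dict.getD_modify]
    by_cases h : t = t0
    · subst h
      rw [if_pos rfl]
      simp only [PySem.Set.mem_add, List.mem_cons, true_or, true_and]
      tauto
    · simp only [if_neg h, List.mem_cons]
      tauto

-- membership characterization of the inverted index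
theorem mem_ownersB (cT : List (List String)) (t : String) (m : Nat) :
    m ∈ (ownersB cT).getD t PySem.Set.empty ↔ m < cT.length ∧ t ∈ cT.getD m [] := by
  unfold ownersB
  have main : ∀ (L : List Nat) (d : PySem.Dict String (PySem.Set Nat)),
      m ∈ (L.foldl (fun d i => (cT.getD i []).foldl
          (fun d t => d.modify t PySem.Set.empty (fun s => PySem.Set.add s i)) d) d).getD t PySem.Set.empty
        ↔ m ∈ d.getD t PySem.Set.empty ∨ (m ∈ L ∧ t ∈ cT.getD m []) := by
    intro L
    induction L with
    | nil => intro d; simp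
    | cons i L ih =>
      intro d
      rw [List.foldl_cons, ih, mem_ownersB_inner]
      constructor
      · rintro ((h | ⟨ht, rfl⟩) | ⟨hm, ht⟩)
        · exact Or.inl h
        · exact Or.inr ⟨List.mem_cons_self, ht⟩
        · exact Or.inr ⟨List.mem_cons_of_mem _ hm, ht⟩
      · rintro (h | ⟨hm, ht⟩)
        · exact Or.inl (Or.inl h)
        · rcases List.mem_cons.1 hm with rfl | hm
          · exact Or.inl (Or.inr ⟨ht, rfl⟩)
          · exact Or.inr ⟨hm, ht⟩
  rw [main]
  simp [PySem.Dict.getD_empty, PySem.Set.empty, List.mem_range]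

-- membership in the posting-list intersection
theorem mem_domB (owners : PySem.Dict String (PySem.Set Nat)) (n : Nat) (tk : List String) (m : Nat) :
    m ∈ domB owners n tk ↔ m < n ∧ ∀ t ∈ tk, m ∈ owners.getD t PySem.Set.empty := by
  unfold domB
  have main : ∀ (L : List String) (s : PySem.Set Nat),
      m ∈ L.foldl (fun dom t => PySem.Set.inter dom (owners.getD t PySem.Set.empty)) s
        ↔ m ∈ s ∧ ∀ t ∈ L, m ∈ owners.getD t PySem.Set.empty := by
    intro L
    induction L with
    | nil => intro s; simp
    | cons t0 L ih =>
      intro s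
      rw [List.foldl_cons, ih]
      simp only [PySem.Set.mem_inter, List.forall_mem_cons]
      tauto
  rw [main, PySem.Set.mem_ofList, List.mem_range]

theorem getD_sizes (cT : List (List String)) (m : Nat) (hm : m < cT.length) :
    (cT.map (fun t => (PySem.Set.ofList t).length)).getD m 0 = (PySem.Set.ofList (cT.getD m [])).length := by
  simp only [List.getD, List.getElem?_map]
  rw [List.getElem?_eq_getElem hm]
  simp

-- subset + equal deduped size ↔ equal member sets (both sides Nodup)
theorem len_eq_iff_equal (s t : List String) (hs : s.Nodup) (ht : t.Nodup)
    (hsub : ∀ x ∈ s, x ∈ t) : s.length = t.length ↔ ∀ x, x ∈ s ↔ x ∈ t := by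
  constructor
  · intro hlen
    have hfs : s.toFinset ⊆ t.toFinset := by
      intro x hx
      exact List.mem_toFinset.2 (hsub x (List.mem_toFinset.1 hx))
    have hcard : t.toFinset.card ≤ s.toFinset.card := by
      rw [List.toFinset_card_of_nodup hs, List.toFinset_card_of_nodup ht, hlen]
    have heq : s.toFinset = t.toFinset := Finset.eq_of_subset_of_card_le hfs hcard
    intro x
    rw [← List.mem_toFinset, ← List.mem_toFinset (l := t), heq]
  · intro hmem
    exact ((List.perm_ext_iff_of_nodup hs ht).2 hmem).length_eq

-- the subset relation through domB membership
theorem mem_domB_iff_subA (cT : List (List String)) (n : Nat) (hn : n = cT.length) (k m : Nat) :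
    m ∈ domB (ownersB cT) n (cT.getD k []) ↔ m < cT.length ∧ subA cT k m = true := by
  subst hn
  rw [mem_domB]
  unfold subA
  rw [PySem.Set.issubset_iff]
  constructor
  · rintro ⟨hm, h⟩
    refine ⟨hm, ?_⟩
    intro x hx
    rw [PySem.Set.mem_ofList] at hx ⊢
    exact ((mem_ownersB cT x m).1 (h x hx)).2
  · rintro ⟨hm, h⟩
    refine ⟨hm, ?_⟩
    intro t ht
    rw [mem_ownersB]
    exact ⟨hm, by
      have := h t ((PySem.Set.mem_ofList _ _).2 ht)
      rwa [PySem.Set.mem_ofList] at this⟩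

-- the central bridge: A's RemoveSet membership = B's dominated test
theorem contains_eq_dominated (cT : List (List String)) (k : Nat) (hk : k < cT.length) :
    PySem.Set.contains (removeSetA cT) k
      = dominatedB (ownersB cT) (cT.map (fun t => (PySem.Set.ofList t).length)) cT.length k (cT.getD k []) := by
  rw [Bool.eq_iff_iff, PySem.Set.contains_iff, mem_removeSetA]
  unfold dominatedB
  simp only [List.any_eq_true, Bool.and_eq_true, Bool.or_eq_true, decide_eq_true_eq,
    List.mem_range, List.mem_range'_1, addedProp]
  constructor
  · rintro ⟨i, hi, j, hij, h⟩
    obtain ⟨hij1, hij2⟩ := hij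
    have hjn : j < cT.length := by omega
    rcases h with ⟨hsub, hki⟩ | ⟨hns, hsub, hkj⟩
    · subst hki
      refine ⟨j, (mem_domB_iff_subA cT _ rfl k j).2 ⟨hjn, hsub⟩, by omega, Or.inr (by omega)⟩
    · subst hkj
      refine ⟨i, (mem_domB_iff_subA cT _ rfl k i).2 ⟨hi, hsub⟩, by omega, Or.inl ?_⟩
      rw [getD_sizes cT i hi, getD_sizes cT k hk]
      intro hlen
      apply hns
      unfold subA at hsub ⊢
      rw [PySem.Set.issubset_iff] at hsub ⊢
      have := (len_eq_iff_equal _ _ (PySem.Set.nodup_ofList _) (PySem.Set.nodup_ofList _)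
        hsub).1 hlen.symm
      intro x hx
      exact (this x).2 hx
  · rintro ⟨m, hdom, hne, hrest⟩
    have hsub := (mem_domB_iff_subA cT _ rfl k m).1 hdom
    obtain ⟨hm, hsub⟩ := hsub
    by_cases hkm : k < m
    · exact ⟨k, hk, m, ⟨by omega, by omega⟩, Or.inl ⟨hsub, rfl⟩⟩
    · have hmk : m < k := by omega
      have hns : ¬ subA cT m k = true := by
        intro hsub'
        unfold subA at hsub hsub'
        rw [PySem.Set.issubset_iff] at hsub hsub'
        have hlen : (PySem.Set.ofList (cT.getD k [])).length
            = (PySem.Set.ofList (cT.getD m [])).length := by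
          apply (len_eq_iff_equal _ _ (PySem.Set.nodup_ofList _) (PySem.Set.nodup_ofList _) hsub).2
          intro x
          exact ⟨fun hx => hsub x hx, fun hx => hsub' x hx⟩
        rcases hrest with hdiff | hgt
        · rw [getD_sizes cT m hm, getD_sizes cT k hk] at hdiff
          exact hdiff hlen.symm
        · omega
      exact ⟨m, hm, k, ⟨by omega, by omega⟩, Or.inr ⟨hns, hsub, rfl⟩⟩

-- ===== VERDICT (by name: the statement is the Claim_ definition above) =====
theorem RemoveUpwardCompatible_spec : Claim_equal_RemoveUpwardCompatible := by
  intro cL cT _ hpre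
  unfold Spec_RemoveUpwardCompatible RemoveUpwardCompatible RemoveUpwardCompatible_alt
  apply PySem.List.foldl_congr_mem
  intro acc k hkmem
  have hk : k < cL.length := List.mem_range.1 hkmem
  rw [contains_eq_dominated cT k (lt_of_lt_of_le hk hpre)]
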